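-- pv_equiv track=rewrite | github.com/KeithCu/writeragent | scripts/generate_manifest.py | _json_to_python
-- ===== SOURCE A (Python) =====
-- def _json_to_python(text):
--     """Convert JSON literals to Python literals (true->True, false->False, null->None)."""
--     # Only replace JSON keywords when they appear as values, not inside strings
--     result = []
--     in_string = False
--     escape = False
--     i = 0
--     while i < len(text):
--         ch = text[i]
--         if escape:
--             result.append(ch)
--             escape = False
--             i += 1
--             continue
--         if ch == '\\' and in_string:
--             result.append(ch)
--             escape = True
--             i += 1
--             continue
--         if ch == '"':
--             in_string = not in_string
--             result.append(ch)
--             i += 1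
--             continue
--         if in_string:
--             result.append(ch)
--             i += 1
--             continue
--         # Outside string: replace JSON keywords
--         for jval, pyval in (("true", "True"), ("false", "False"), ("null", "None")):
--             if text[i:i+len(jval)] == jval:
--                 # Check it's a whole word (not part of a larger identifier)
--                 before_ok = (i == 0 or not text[i-1].isalnum())
--                 after_ok = (i + len(jval) >= len(text) or not text[i+len(jval)].isalnum())
--                 if before_ok and after_ok:
--                     result.append(pyval)
--                     i += len(jval)
--                     break
--         else:
--             result.append(ch)
--             i += 1
--     return "".join(result)
-- ===== SOURCE B (Python) =====
-- def _json_to_python(text):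
--     """Convert JSON literals to Python literals (true->True, false->False, null->None)."""
--     table = {"true": "True", "false": "False", "null": "None"}
--     out = []
--     i, n = 0, len(text)
--     while i < n:
--         ch = text[i]
--         if ch == '"':
--             # skip a whole string literal at once (backslash escapes the next char)
--             j = i + 1
--             while j < n and text[j] != '"':
--                 j += 2 if text[j] == '\\' else 1
--             j = min(j + 1, n)
--             out.append(text[i:j])
--             i = j
--         elif ch.isalnum():
--             # take the maximal alphanumeric run; replace it iff it is exactly a keyword
--             j = i + 1
--             while j < n and text[j].isalnum():
--                 j += 1
--             word = text[i:j]
--             out.append(table.get(word, word))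
--             i = j
--         else:
--             out.append(ch)
--             i += 1
--     return "".join(out)
-- ===== Notes on version B (the rewrite author's own statement) =====
-- stated objective: simpler
-- what changed: Replaced the fused char-by-char state machine (in_string/escape flags plus three boundary-checked keyword prefix tests at every position) by a segment scanner that skips whole quoted strings in one step and takes maximal alphanumeric runs, replacing a run via one dict lookup iff it equals a keyword.
import Mathlib
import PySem

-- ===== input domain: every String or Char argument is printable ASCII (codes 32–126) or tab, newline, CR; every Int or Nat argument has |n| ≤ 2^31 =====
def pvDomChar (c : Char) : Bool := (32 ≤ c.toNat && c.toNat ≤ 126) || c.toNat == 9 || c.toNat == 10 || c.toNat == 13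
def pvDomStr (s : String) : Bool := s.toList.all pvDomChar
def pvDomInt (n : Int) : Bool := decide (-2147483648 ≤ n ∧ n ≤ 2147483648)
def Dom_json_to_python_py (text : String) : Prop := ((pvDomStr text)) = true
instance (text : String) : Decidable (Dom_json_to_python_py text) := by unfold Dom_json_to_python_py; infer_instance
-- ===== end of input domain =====

-- B replaces A's fused per-character state machine by a segment scanner (whole quoted strings
-- skipped in one step, maximal alphanumeric runs looked up in a dict); objective: simpler.

-- ===== PORT A =====
def pvKw : List (List Char × List Char) :=
  [("true".toList, "True".toList), ("false".toList, "False".toList), ("null".toList, "None".toList)]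
def pvBeforeOk (prev : Option Char) : Bool :=
  match prev with | none => true | some p => !(PySem.Chars.isalnum p)
def pvAfterOk (s : List Char) : Bool :=
  match s with | [] => true | c :: _ => !(PySem.Chars.isalnum c)
def pvTry (kws : List (List Char × List Char)) (s : List Char) (prev : Option Char) :
    Option (List Char × List Char × List Char) :=
  match kws with
  | [] => none
  | (j, p) :: ks =>
    if s.take j.length = j then
      if pvBeforeOk prev && pvAfterOk (s.drop j.length) then some (p, j, s.drop j.length)
      else pvTry ks s prev
    else pvTry ks s prev
theorem pvTry_shrinks (kws : List (List Char × List Char)) (hne : ∀ q ∈ kws, q.1 ≠ [])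
    (s : List Char) (prev : Option Char) (p j r : List Char)
    (h : pvTry kws s prev = some (p, j, r)) : r.length < s.length := by
  induction kws with
  | nil => simp [pvTry] at h
  | cons q ks ih =>
    obtain ⟨jv, pv⟩ := q
    have hj : jv ≠ [] := hne (jv, pv) (by simp)
    simp only [pvTry] at h
    split_ifs at h with h1 h2
    · have hlen : (s.take jv.length).length = jv.length := by rw [h1]
      simp only [List.length_take] at hlen
      have hj1 : 1 ≤ jv.length := by
        cases jv with
        | nil => exact absurd rfl hj
        | cons a t => simp
      simp only [Option.some.injEq, Prod.mk.injEq] at h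
      obtain ⟨-, -, hr⟩ := h
      subst hr
      simp only [List.length_drop]
      omega
    · exact ih (fun q hq => hne q (List.mem_cons_of_mem _ hq)) h
    · exact ih (fun q hq => hne q (List.mem_cons_of_mem _ hq)) h
theorem pvKw_nonempty : ∀ q ∈ pvKw, q.1 ≠ [] := by decide
def pvALoop : List Char → Bool → Bool → Option Char → List Char
  | [], _, _, _ => []
  | c :: rest, instr, esc, prev =>
    if esc then c :: pvALoop rest instr false (some c)
    else if c = '\\' ∧ instr = true then c :: pvALoop rest instr true (some c)
    else if c = '"' then c :: pvALoop rest (!instr) esc (some c)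
    else if instr then c :: pvALoop rest instr esc (some c)
    else
      match h : pvTry pvKw (c :: rest) prev with
      | some (py, j, rest') => py ++ pvALoop rest' instr esc (some (j.getLastD c))
      | none => c :: pvALoop rest instr esc (some c)
  termination_by s => s.length
  decreasing_by
  · simp
  · simp
  · simp
  · simp
  · exact pvTry_shrinks pvKw pvKw_nonempty _ _ _ _ _ h
  · simp

def json_to_python_py (text : String) : String :=
  String.ofList (pvALoop text.toList false false none)

-- ===== PORT B =====
def pvTable : PySem.Dict (List Char) (List Char) :=
  PySem.Dict.ofList
    [("true".toList, "True".toList), ("false".toList, "False".toList), ("null".toList, "None".toList)]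
def pvTakeString : List Char → List Char × List Char
  | [] => ([], [])
  | c :: rest =>
    if c = '"' then ([c], rest)
    else if c = '\\' then
      match rest with
      | [] => ([c], [])
      | d :: rest' => let p := pvTakeString rest'; (c :: d :: p.1, p.2)
    else let p := pvTakeString rest; (c :: p.1, p.2)
theorem pvTakeString_snd_le (l : List Char) : (pvTakeString l).2.length ≤ l.length := by
  induction l using pvTakeString.induct with
  | case1 => rw [pvTakeString.eq_def]
  | case2 => rw [pvTakeString.eq_def]; simp
  | case3 => rw [pvTakeString.eq_def]; simp [*]
  | case4 => rw [pvTakeString.eq_def]; simp [*]; omega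
  | case5 => rw [pvTakeString.eq_def]; simp [*]; omega
def pvBLoop : List Char → List Char
  | [] => []
  | c :: rest =>
    if c = '"' then
      c :: (pvTakeString rest).1 ++ pvBLoop (pvTakeString rest).2
    else if PySem.Chars.isalnum c then
      PySem.Dict.getD pvTable (c :: rest.takeWhile PySem.Chars.isalnum) (c :: rest.takeWhile PySem.Chars.isalnum)
        ++ pvBLoop (rest.dropWhile PySem.Chars.isalnum)
    else c :: pvBLoop rest
  termination_by l => l.length
  decreasing_by
  · have := pvTakeString_snd_le rest; simp; omega
  · have := List.length_dropWhile_le PySem.Chars.isalnum rest; simp; omega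
  · simp

def json_to_python_py_alt (text : String) : String :=
  String.ofList (pvBLoop text.toList)

-- ===== PRECONDITION & SPEC =====
def Spec_json_to_python_py (text : String) (out : String) : Prop := out = json_to_python_py_alt text
instance (text : String) (out : String) : Decidable (Spec_json_to_python_py text out) := by unfold Spec_json_to_python_py; infer_instance

-- ===== CLAIM (what is proved, stated in full; the proofs are below) =====
def Claim_equal_json_to_python_py : Prop := ∀ (text : String), Dom_json_to_python_py text → Spec_json_to_python_py text (json_to_python_py text)

-- ===== LEMMAS AND PROOFS =====

theorem pvALoop_nil (i e : Bool) (p : Option Char) : pvALoop [] i e p = [] := by rw [pvALoop.eq_def]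
theorem pvALoop_esc (c : Char) (r : List Char) (i : Bool) (p : Option Char) :
    pvALoop (c :: r) i true p = c :: pvALoop r i false (some c) := by rw [pvALoop.eq_def]; simp
theorem pvALoop_bs (r : List Char) (p : Option Char) :
    pvALoop ('\\' :: r) true false p = '\\' :: pvALoop r true true (some '\\') := by
  rw [pvALoop.eq_def]; simp
theorem pvALoop_quote (r : List Char) (i : Bool) (p : Option Char) :
    pvALoop ('"' :: r) i false p = '"' :: pvALoop r (!i) false (some '"') := by
  rw [pvALoop.eq_def]; simp
theorem pvALoop_instr (c : Char) (r : List Char) (p : Option Char) (h1 : c ≠ '"') (h2 : c ≠ '\\') :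
    pvALoop (c :: r) true false p = c :: pvALoop r true false (some c) := by
  rw [pvALoop.eq_def]; simp [h1, h2]
theorem pvALoop_plain_some (c : Char) (r : List Char) (p : Option Char) (py j r' : List Char)
    (h1 : c ≠ '"') (h : pvTry pvKw (c :: r) p = some (py, j, r')) :
    pvALoop (c :: r) false false p = py ++ pvALoop r' false false (some (j.getLastD c)) := by
  rw [pvALoop.eq_def]
  simp [h1]
  split
  · rename_i py' j' r'' heq
    rw [h] at heq
    cases heq
    rfl
  · rename_i heq
    rw [h] at heq
    cases heq
theorem pvALoop_plain_none (c : Char) (r : List Char) (p : Option Char)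
    (h1 : c ≠ '"') (h : pvTry pvKw (c :: r) p = none) :
    pvALoop (c :: r) false false p = c :: pvALoop r false false (some c) := by
  rw [pvALoop.eq_def]; simp only []
  simp [h1]
  split
  · rename_i py' j' r'' heq
    rw [h] at heq
    cases heq
  · rfl

theorem pvBLoop_nil : pvBLoop [] = [] := by rw [pvBLoop.eq_def]
theorem pvBLoop_quote (r : List Char) :
    pvBLoop ('"' :: r) = '"' :: (pvTakeString r).1 ++ pvBLoop (pvTakeString r).2 := by
  rw [pvBLoop.eq_def]; simp
theorem pvBLoop_alnum (c : Char) (r : List Char) (h : PySem.Chars.isalnum c = true) :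
    pvBLoop (c :: r) =
      PySem.Dict.getD pvTable (c :: r.takeWhile PySem.Chars.isalnum) (c :: r.takeWhile PySem.Chars.isalnum)
        ++ pvBLoop (r.dropWhile PySem.Chars.isalnum) := by
  have hq : c ≠ '"' := by intro he; subst he; exact absurd h (by decide)
  rw [pvBLoop.eq_def]; simp [hq, h]
theorem pvBLoop_other (c : Char) (r : List Char) (h1 : c ≠ '"') (h2 : PySem.Chars.isalnum c = false) :
    pvBLoop (c :: r) = c :: pvBLoop r := by
  rw [pvBLoop.eq_def]; simp [h1, h2]

-- string-mode lemma
theorem pvALoop_string (l : List Char) : ∀ (prev : Option Char),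
    pvALoop l true false prev =
      (pvTakeString l).1 ++ pvALoop (pvTakeString l).2 false false (some '"') := by
  induction l using pvTakeString.induct with
  | case1 => intro prev; rw [pvTakeString.eq_def]; simp [pvALoop_nil]
  | case2 r => intro prev; rw [pvTakeString.eq_def]; simp [pvALoop_quote]
  | case3 h => intro prev; rw [pvTakeString.eq_def]; simp [pvALoop_bs, pvALoop_nil]
  | case4 d rest' h ih =>
    intro prev
    rw [pvTakeString.eq_def]
    simp [pvALoop_bs, pvALoop_esc, ih]
  | case5 d rest' h1 h2 ih =>
    intro prev
    rw [pvTakeString.eq_def]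
    simp [h1, h2, pvALoop_instr d rest' prev h1 h2, ih]

theorem pvTry_none_of_before_false (kws : List (List Char × List Char)) (s : List Char)
    (prev : Option Char) (hp : pvBeforeOk prev = false) : pvTry kws s prev = none := by
  induction kws with
  | nil => rfl
  | cons q ks ih =>
    obtain ⟨j, p⟩ := q
    simp [pvTry, hp, ih]

theorem pv_run_match : ∀ (k : List Char), (∀ x ∈ k, PySem.Chars.isalnum x = true) →
    ∀ (w rest : List Char), (∀ x ∈ w, PySem.Chars.isalnum x = true) → pvAfterOk rest = true →
    (((w ++ rest).take k.length = k ∧ pvAfterOk ((w ++ rest).drop k.length) = true) ↔ w = k) := by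
  intro k
  induction k with
  | nil =>
    intro _ w rest hw hr
    cases w with
    | nil => simp [hr]
    | cons c w' =>
      have hc := hw c (by simp)
      simp [pvAfterOk, hc]
  | cons a k' ih =>
    intro hk w rest hw hr
    cases w with
    | nil =>
      simp only [List.nil_append]
      constructor
      · rintro ⟨h1, h2⟩
        exfalso
        cases rest with
        | nil => simp at h1
        | cons b t =>
          rw [List.length_cons, List.take_succ_cons] at h1
          obtain ⟨rfl, -⟩ := List.cons.injEq .. ▸ h1
          have := hk b (by simp)
          simp [pvAfterOk, this] at hr
      · intro h; exact absurd h (by simp)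
    | cons c w' =>
      have hiff := ih (fun x hx => hk x (by simp [hx])) w' rest (fun x hx => hw x (by simp [hx])) hr
      simp only [List.cons_append, List.length_cons, List.take_succ_cons, List.drop_succ_cons]
      constructor
      · rintro ⟨h1, h2⟩
        obtain ⟨rfl, h1'⟩ := List.cons.injEq .. ▸ h1
        rw [hiff.mp ⟨h1', h2⟩]
      · intro h
        obtain ⟨rfl, rfl⟩ := List.cons.injEq .. ▸ h
        obtain ⟨h1', h2⟩ := hiff.mpr rfl
        exact ⟨by rw [h1'], h2⟩

theorem pvTry_cons_iff (j p : List Char) (ks : List (List Char × List Char)) (s : List Char)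
    (prev : Option Char) (hp : pvBeforeOk prev = true) :
    pvTry ((j, p) :: ks) s prev =
      if s.take j.length = j ∧ pvAfterOk (s.drop j.length) = true then some (p, j, s.drop j.length)
      else pvTry ks s prev := by
  by_cases h1 : s.take j.length = j
  · by_cases h2 : pvAfterOk (s.drop j.length) = true
    · simp [pvTry, hp, h1, h2]
    · simp [pvTry, hp, h1, h2]
  · simp [pvTry, h1]

set_option maxRecDepth 8192 in
theorem pvTry_run (w rest : List Char) (prev : Option Char)
    (hw : ∀ x ∈ w, PySem.Chars.isalnum x = true) (hr : pvAfterOk rest = true)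
    (hp : pvBeforeOk prev = true) :
    pvTry pvKw (w ++ rest) prev =
      if w = "true".toList then some ("True".toList, "true".toList, rest)
      else if w = "false".toList then some ("False".toList, "false".toList, rest)
      else if w = "null".toList then some ("None".toList, "null".toList, rest)
      else none := by
  have ht := pv_run_match "true".toList (by intro x hx; fin_cases hx <;> decide) w rest hw hr
  have hf := pv_run_match "false".toList (by intro x hx; fin_cases hx <;> decide) w rest hw hr
  have hn := pv_run_match "null".toList (by intro x hx; fin_cases hx <;> decide) w rest hw hr
  show pvTry pvKw (w ++ rest) prev = _
  rw [pvKw, pvTry_cons_iff _ _ _ _ _ hp, pvTry_cons_iff _ _ _ _ _ hp,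
      pvTry_cons_iff _ _ _ _ _ hp]
  simp only [ht, hf, hn, pvTry]
  split_ifs with g1 g2 g3
  · subst g1; rw [List.drop_left]
  · subst g2; rw [List.drop_left]
  · subst g3; rw [List.drop_left]
  · rfl

def pvPrevAfter (w : List Char) (p : Option Char) : Option Char :=
  match w.getLast? with
  | some c => some c
  | none => p

theorem pvPrevAfter_cons (c : Char) (w : List Char) (p : Option Char) :
    pvPrevAfter (c :: w) p = pvPrevAfter w (some c) := by
  cases w with
  | nil => simp [pvPrevAfter]
  | cons d w' =>
    unfold pvPrevAfter
    rw [List.getLast?_cons_cons]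
    cases h : (d :: w').getLast? with
    | none => simp at h
    | some x => rfl

theorem pvTry_none_head_nonalnum (c : Char) (rest : List Char) (prev : Option Char)
    (hc : PySem.Chars.isalnum c = false) : pvTry pvKw (c :: rest) prev = none := by
  have ct : c ≠ 't' := by intro h; subst h; exact (by decide : ¬ PySem.Chars.isalnum 't' = false) hc
  have cf : c ≠ 'f' := by intro h; subst h; exact (by decide : ¬ PySem.Chars.isalnum 'f' = false) hc
  have cn : c ≠ 'n' := by intro h; subst h; exact (by decide : ¬ PySem.Chars.isalnum 'n' = false) hc
  simp [pvTry, pvKw, ct, cf, cn]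

theorem pvALoop_emit (w : List Char) : ∀ (rest : List Char) (p : Option Char),
    (∀ x ∈ w, PySem.Chars.isalnum x = true) → pvBeforeOk p = false →
    pvALoop (w ++ rest) false false p = w ++ pvALoop rest false false (pvPrevAfter w p) := by
  induction w with
  | nil => intro rest p _ _; simp [pvPrevAfter]
  | cons c w' ih =>
    intro rest p hw hp
    have hc : PySem.Chars.isalnum c = true := hw c (by simp)
    have hq : c ≠ '"' := by intro h; subst h; exact absurd hc (by decide)
    rw [List.cons_append,
        pvALoop_plain_none c (w' ++ rest) p hq (pvTry_none_of_before_false _ _ _ hp),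
        ih rest (some c) (fun x hx => hw x (by simp [hx])) (by simp [pvBeforeOk, hc]),
        pvPrevAfter_cons, List.cons_append]

theorem getD_pvTable_self (w : List Char) (h1 : w ≠ "true".toList) (h2 : w ≠ "false".toList)
    (h3 : w ≠ "null".toList) : PySem.Dict.getD pvTable w w = w := by
  rw [show pvTable = PySem.Dict.mk
        [("true".toList, "True".toList), ("false".toList, "False".toList),
         ("null".toList, "None".toList)] from by decide]
  have e1 : "true".toList = ['t', 'r', 'u', 'e'] := by decide
  have e2 : "false".toList = ['f', 'a', 'l', 's', 'e'] := by decide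
  have e3 : "null".toList = ['n', 'u', 'l', 'l'] := by decide
  rw [e1] at h1; rw [e2] at h2; rw [e3] at h3
  have g1 : ¬ (['t', 'r', 'u', 'e'] = w) := fun h => h1 h.symm
  have g2 : ¬ (['f', 'a', 'l', 's', 'e'] = w) := fun h => h2 h.symm
  have g3 : ¬ (['n', 'u', 'l', 'l'] = w) := fun h => h3 h.symm
  simp [PySem.Dict.getD, PySem.Dict.get?, g1, g2, g3]

theorem pvALoop_run (w rest : List Char) (p : Option Char) (hne : w ≠ [])
    (hw : ∀ x ∈ w, PySem.Chars.isalnum x = true) (hr : pvAfterOk rest = true)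
    (hp : pvBeforeOk p = true) :
    pvALoop (w ++ rest) false false p =
      PySem.Dict.getD pvTable w w ++ pvALoop rest false false (pvPrevAfter w p) := by
  obtain ⟨c, w', rfl⟩ := List.exists_cons_of_ne_nil hne
  have hc : PySem.Chars.isalnum c = true := hw c (by simp)
  have hq : c ≠ '"' := by intro h; subst h; exact absurd hc (by decide)
  have htry := pvTry_run (c :: w') rest p hw hr hp
  by_cases g1 : (c :: w') = "true".toList
  · have g := g1
    rw [show "true".toList = 't' :: ['r', 'u', 'e'] from by decide] at g
    obtain ⟨rfl, rfl⟩ := List.cons.injEq .. ▸ g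
    rw [if_pos g1] at htry
    rw [List.cons_append] at htry ⊢
    rw [pvALoop_plain_some _ _ _ _ _ _ hq htry]
    rfl
  · by_cases g2 : (c :: w') = "false".toList
    · have g := g2
      rw [show "false".toList = 'f' :: ['a', 'l', 's', 'e'] from by decide] at g
      obtain ⟨rfl, rfl⟩ := List.cons.injEq .. ▸ g
      rw [if_neg g1, if_pos g2] at htry
      rw [List.cons_append] at htry ⊢
      rw [pvALoop_plain_some _ _ _ _ _ _ hq htry]
      rfl
    · by_cases g3 : (c :: w') = "null".toList
      · have g := g3
        rw [show "null".toList = 'n' :: ['u', 'l', 'l'] from by decide] at g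
        obtain ⟨rfl, rfl⟩ := List.cons.injEq .. ▸ g
        rw [if_neg g1, if_neg g2, if_pos g3] at htry
        rw [List.cons_append] at htry ⊢
        rw [pvALoop_plain_some _ _ _ _ _ _ hq htry]
        rfl
      · rw [if_neg g1, if_neg g2, if_neg g3] at htry
        rw [List.cons_append] at htry ⊢
        rw [pvALoop_plain_none c _ p hq htry]
        rw [pvALoop_emit w' rest (some c) (fun x hx => hw x (by simp [hx]))
              (by simp [pvBeforeOk, hc])]
        rw [getD_pvTable_self _ g1 g2 g3, pvPrevAfter_cons, List.cons_append]

theorem pvAfterOk_dropWhile (l : List Char) :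
    pvAfterOk (l.dropWhile PySem.Chars.isalnum) = true := by
  induction l with
  | nil => rfl
  | cons c rest ih =>
    by_cases h : PySem.Chars.isalnum c
    · simpa [h] using ih
    · simp [h, pvAfterOk]

theorem pv_main : ∀ (n : Nat) (l : List Char) (p : Option Char), l.length ≤ n →
    (pvBeforeOk p = true ∨ pvAfterOk l = true) →
    pvALoop l false false p = pvBLoop l := by
  intro n
  induction n with
  | zero =>
    intro l p hl _
    cases l with
    | nil => rw [pvALoop_nil, pvBLoop_nil]
    | cons c rest => simp at hl
  | succ n ih =>
    intro l p hl hinv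
    cases l with
    | nil => rw [pvALoop_nil, pvBLoop_nil]
    | cons c rest =>
      by_cases hq : c = '"'
      · subst hq
        rw [pvALoop_quote]
        simp only [Bool.not_false]
        rw [pvALoop_string rest, pvBLoop_quote]
        rw [ih (pvTakeString rest).2 (some '"')
              (by have := pvTakeString_snd_le rest; simp at hl; omega)
              (Or.inl (by decide))]
        simp
      · by_cases ha : PySem.Chars.isalnum c
        · have hp : pvBeforeOk p = true := by
            rcases hinv with h | h
            · exact h
            · exfalso; simp [pvAfterOk, ha] at h
          have hsplit : c :: rest =
              (c :: rest.takeWhile PySem.Chars.isalnum) ++ rest.dropWhile PySem.Chars.isalnum := by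
            rw [List.cons_append, List.takeWhile_append_dropWhile]
          rw [pvBLoop_alnum c rest ha, hsplit,
              pvALoop_run _ _ _ (by simp)
                (by
                  intro x hx
                  rcases List.mem_cons.mp hx with rfl | hx'
                  · exact ha
                  · exact List.mem_takeWhile_imp hx')
                (pvAfterOk_dropWhile rest) hp]
          rw [ih (rest.dropWhile PySem.Chars.isalnum) _
                (by have := List.length_dropWhile_le PySem.Chars.isalnum rest; simp at hl; omega)
                (Or.inr (pvAfterOk_dropWhile rest))]
        · have hna : PySem.Chars.isalnum c = false := by simpa using ha
          rw [pvALoop_plain_none c rest p hq (pvTry_none_head_nonalnum c rest p hna),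
              pvBLoop_other c rest hq hna]
          rw [ih rest (some c) (by simp at hl; omega) (Or.inl (by simp [pvBeforeOk, hna]))]

-- ===== VERDICT (by name: the statement is the Claim_ definition above) =====
theorem json_to_python_py_spec : Claim_equal_json_to_python_py := by
  intro text _
  unfold Spec_json_to_python_py json_to_python_py json_to_python_py_alt
  exact congrArg String.ofList (pv_main text.toList.length text.toList none le_rfl (Or.inl rfl))
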